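-- pv_equiv track=rewrite | github.com/bocchiko/DSS-Polymorphic-Cipher | emisor.py | key_table_generator
-- ===== SOURCE A (Python) =====
-- def fs(x, y):
--     return (x ^ y) ^ (x >> 1)
--
-- def fg(x, y):
--     return (x & y) ^ (x << 1)
--
-- def fm(x, y):
--     return (x | y) ^ (y >> 1)
--
-- def key_table_generator(key_number, p, q, s):
--     keys = []
--     psn = 0
--     for i in range(key_number):
--         PO = fs(p, s)
--         key = fg(PO, q)
--         keys.append(key)
--         s = fm(s, q)
--         psn = (psn + 1) % 16
--     return keys
-- ===== SOURCE B (Python) =====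
-- def key_table_generator(key_number, p, q, s):
--     # Closed form: the state recurrence s' = (s | q) ^ (q >> 1) is, bit by bit,
--     # constant on bits where q is 1 and an involution on bits where q is 0, so the
--     # state sequence is s, s1, s2, s1, s2, ...  (period 2 after the first step).
--     # Only three keys ever occur; the table is built by list repetition.
--     if key_number <= 0:
--         return []
--
--     def key(st):
--         po = (p ^ st) ^ (p >> 1)
--         return (po & q) ^ (po << 1)
--
--     s1 = (s | q) ^ (q >> 1)
--     s2 = (s1 | q) ^ (q >> 1)
--     m = key_number - 1
--     return [key(s)] + [key(s1), key(s2)] * (m // 2) + [key(s1)] * (m % 2)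
-- ===== Notes on version B (the rewrite author's own statement) =====
-- stated objective: faster
-- what changed: Replaces A's per-iteration bitwise recurrence with a closed form: the state update s' = (s|q)^(q>>1) has period 2 after the first step (bitwise: constant where q has a 1-bit, involutive where q has a 0-bit), so only three distinct keys exist and the table is built by list repetition instead of n recurrence steps.
import Mathlib
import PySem

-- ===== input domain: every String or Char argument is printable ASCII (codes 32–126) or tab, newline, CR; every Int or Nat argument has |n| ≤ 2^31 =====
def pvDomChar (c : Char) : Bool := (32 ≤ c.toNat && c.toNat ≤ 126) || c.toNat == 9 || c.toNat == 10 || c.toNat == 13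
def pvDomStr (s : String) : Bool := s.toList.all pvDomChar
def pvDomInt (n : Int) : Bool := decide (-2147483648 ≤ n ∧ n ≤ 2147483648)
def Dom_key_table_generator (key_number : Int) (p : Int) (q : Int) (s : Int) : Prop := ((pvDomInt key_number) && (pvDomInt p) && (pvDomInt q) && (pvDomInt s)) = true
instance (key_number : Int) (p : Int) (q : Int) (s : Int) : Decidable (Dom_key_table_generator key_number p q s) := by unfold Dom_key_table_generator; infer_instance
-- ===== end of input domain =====

-- B replaces A's n-step bitwise recurrence by a closed form: the state update
-- s' = (s|q)^(q>>1) has period 2 after the first step, so only three distinct keys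
-- occur and B builds the table by list repetition (objective: faster, constant-factor).

-- ===== PORT A =====
def fs_py (x y : Int) : Int := PySem.Int.bxor (PySem.Int.bxor x y) (x >>> 1)
def fg_py (x y : Int) : Int := PySem.Int.bxor (PySem.Int.band x y) (x <<< 1)
def fm_py (x y : Int) : Int := PySem.Int.bxor (PySem.Int.bor x y) (y >>> 1)

def key_table_generator (key_number : Int) (p : Int) (q : Int) (s : Int) : List Int :=
  -- keys = []; psn = 0; for i in range(key_number): … ; return keys
  let st := (PySem.List.pyRange 0 key_number 1).foldl
    (fun (acc : List Int × Int × Int) _ =>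
      let PO := fs_py p acc.2.1
      let key := fg_py PO q
      (acc.1 ++ [key], fm_py acc.2.1 q, PySem.Int.mod (acc.2.2 + 1) 16))
    ([], s, 0)
  st.1

-- ===== PORT B =====
-- key(st) of Source B
def ktgKey (p q st : Int) : Int :=
  let po := PySem.Int.bxor (PySem.Int.bxor p st) (p >>> 1)
  PySem.Int.bxor (PySem.Int.band po q) (po <<< 1)

def key_table_generator_alt (key_number : Int) (p : Int) (q : Int) (s : Int) : List Int :=
  if key_number ≤ 0 then []
  else
    let s1 := PySem.Int.bxor (PySem.Int.bor s q) (q >>> 1)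
    let s2 := PySem.Int.bxor (PySem.Int.bor s1 q) (q >>> 1)
    let m := key_number - 1
    -- [key(s)] + [key(s1), key(s2)] * (m // 2) + [key(s1)] * (m % 2)
    [ktgKey p q s]
      ++ (List.replicate (PySem.Int.floordiv m 2).toNat [ktgKey p q s1, ktgKey p q s2]).flatten
      ++ List.replicate (PySem.Int.mod m 2).toNat (ktgKey p q s1)

-- ===== PRECONDITION & SPEC =====
def Spec_key_table_generator (key_number : Int) (p : Int) (q : Int) (s : Int) (out : List Int) : Prop := out = key_table_generator_alt key_number p q s
instance (key_number : Int) (p : Int) (q : Int) (s : Int) (out : List Int) : Decidable (Spec_key_table_generator key_number p q s out) := by unfold Spec_key_table_generator; infer_instance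

-- ===== CLAIM (what is proved, stated in full; the proofs are below) =====
def Claim_equal_key_table_generator : Prop := ∀ (key_number : Int) (p : Int) (q : Int) (s : Int), Dom_key_table_generator key_number p q s → Spec_key_table_generator key_number p q s (key_table_generator key_number p q s)

-- ===== LEMMAS AND PROOFS =====

-- the list of successive states s, fm(s,q), fm(fm(s,q),q), … of A's loop
def ktgStates (n : Nat) (q : Int) (s : Int) : List Int :=
  match n with
  | 0 => []
  | Nat.succ m => s :: ktgStates m q (fm_py s q)

-- A's loop, characterised: it maps key over the state sequence
theorem ktg_loop (p q : Int) (l : List Int) :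
    ∀ (keys : List Int) (st psn : Int),
      (l.foldl (fun (acc : List Int × Int × Int) _ =>
          let PO := fs_py p acc.2.1
          let key := fg_py PO q
          (acc.1 ++ [key], fm_py acc.2.1 q, PySem.Int.mod (acc.2.2 + 1) 16))
        (keys, st, psn)).1
      = keys ++ (ktgStates l.length q st).map (fun t => ktgKey p q t) := by
  induction l with
  | nil => intro keys st psn; simp [ktgStates]
  | cons x xs ih =>
      intro keys st psn
      simp only [List.foldl_cons, List.length_cons, ktgStates, List.map_cons]
      rw [ih]
      simp [ktgKey, fg_py, fs_py, List.append_assoc]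

theorem nat_ldiff_add_and (n : Nat) : ∀ m, Nat.ldiff n m + (n &&& m) = n := by
  induction n using Nat.binaryRec with
  | zero => intro m; simp [Nat.ldiff]
  | bit b n' ih =>
      intro m
      induction m using Nat.bitCasesOn with
      | _ c m' =>
        rw [Nat.ldiff_bit, Nat.land_bit, Nat.bit_val, Nat.bit_val, Nat.bit_val]
        have := ih m'
        cases b <;> cases c <;> simp <;> omega

theorem bor_eq_lor (a b : Int) : PySem.Int.bor a b = Int.lor a b := by
  rcases a with m | m <;> rcases b with n | n <;>
      simp [PySem.Int.bor, Int.lor, Int.negSucc_eq] <;> try omega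
  · rw [if_neg (by omega)]
    have h := nat_ldiff_add_and n m
    have hs : n - (n &&& m) = n.ldiff m := by omega
    rw [hs]; ring
  · rw [if_neg (by omega)]
    have h := nat_ldiff_add_and m n
    have hs : m - (m &&& n) = m.ldiff n := by omega
    rw [hs]; ring

theorem bxor_eq_xor (a b : Int) : PySem.Int.bxor a b = Int.xor a b := by
  rcases a with m | m <;> rcases b with n | n <;>
      simp [PySem.Int.bxor, Int.xor, Int.negSucc_eq] <;> try omega

-- two integers with the same two's-complement bits are equal
theorem int_eq_of_testBit_eq {a b : Int} (h : ∀ i, a.testBit i = b.testBit i) : a = b := by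
  rcases a with m | m <;> rcases b with n | n
  · exact congrArg _ (Nat.eq_of_testBit_eq fun i => h i)
  · exfalso
    have hh := h (m + n)
    have hm : Nat.testBit m (m+n) = false :=
      Nat.testBit_lt_two_pow (lt_of_lt_of_le Nat.lt_two_pow_self (Nat.pow_le_pow_right (by norm_num) (by omega)))
    have hn : Nat.testBit n (m+n) = false :=
      Nat.testBit_lt_two_pow (lt_of_lt_of_le Nat.lt_two_pow_self (Nat.pow_le_pow_right (by norm_num) (by omega)))
    simp [Int.testBit, hm, hn] at hh
  · exfalso
    have hh := h (m + n)
    have hm : Nat.testBit m (m+n) = false :=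
      Nat.testBit_lt_two_pow (lt_of_lt_of_le Nat.lt_two_pow_self (Nat.pow_le_pow_right (by norm_num) (by omega)))
    have hn : Nat.testBit n (m+n) = false :=
      Nat.testBit_lt_two_pow (lt_of_lt_of_le Nat.lt_two_pow_self (Nat.pow_le_pow_right (by norm_num) (by omega)))
    simp [Int.testBit, hm, hn] at hh
  · exact congrArg _ (Nat.eq_of_testBit_eq fun i => by
      have := h i; simpa [Int.testBit] using this)

-- the heart of B: three applications of the state update equal one (period 2 after the first step)
theorem fm3_eq_fm (q x : Int) : fm_py (fm_py (fm_py x q) q) q = fm_py x q := by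
  simp only [fm_py]
  apply int_eq_of_testBit_eq
  intro i
  simp only [bxor_eq_xor, bor_eq_lor, Int.testBit_lxor, Int.testBit_lor]
  cases x.testBit i <;> cases q.testBit i <;> cases (q >>> 1 : Int).testBit i <;> rfl

theorem ktgStates_succ (m : Nat) (q s : Int) :
    ktgStates (m + 1) q s = s :: ktgStates m q (fm_py s q) := rfl

theorem ktgStates_even (q s1 s2 : Int) (h1 : fm_py s1 q = s2) (h2 : fm_py s2 q = s1) :
    ∀ k, ktgStates (2 * k) q s1 = (List.replicate k [s1, s2]).flatten := by
  intro k
  induction k with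
  | zero => simp [ktgStates]
  | succ k ih =>
      have hk : 2 * (k + 1) = (2 * k) + 1 + 1 := by ring
      rw [hk, ktgStates_succ, h1, ktgStates_succ, h2, ih]
      simp [List.replicate_succ]

theorem ktgStates_odd (q s1 s2 : Int) (h1 : fm_py s1 q = s2) (h2 : fm_py s2 q = s1) :
    ∀ k, ktgStates (2 * k + 1) q s1 = (List.replicate k [s1, s2]).flatten ++ [s1] := by
  intro k
  induction k with
  | zero => simp [ktgStates]
  | succ k ih =>
      have hk : 2 * (k + 1) + 1 = (2 * k + 1) + 1 + 1 := by ring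
      rw [hk, ktgStates_succ, h1, ktgStates_succ, h2, ih]
      simp [List.replicate_succ]

-- ===== VERDICT (by name: the statement is the Claim_ definition above) =====
theorem key_table_generator_spec : Claim_equal_key_table_generator := by
  intro n p q s _
  unfold Spec_key_table_generator key_table_generator key_table_generator_alt
  rw [ktg_loop]
  simp only [PySem.List.length_pyRange_one, List.nil_append]
  by_cases hn : n ≤ 0
  · rw [if_pos hn]
    have h0 : (n - 0).toNat = 0 := by omega
    rw [h0]
    simp [ktgStates]
  · rw [if_neg hn]
    obtain ⟨k, hk⟩ : ∃ k : Nat, n = (k : Int) + 1 := ⟨(n - 1).toNat, by omega⟩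
    have hlen : (n - 0).toNat = k + 1 := by omega
    rw [hlen]
    have hfd : (PySem.Int.floordiv (n - 1) 2).toNat = k / 2 := by
      rw [PySem.Int.floordiv_eq_ediv_of_pos (by norm_num)]
      omega
    have hmd : (PySem.Int.mod (n - 1) 2).toNat = k % 2 := by
      rw [PySem.Int.mod_eq_emod_of_pos (by norm_num)]
      omega
    rw [hfd, hmd]
    set s1 := PySem.Int.bxor (PySem.Int.bor s q) (q >>> 1) with hs1
    set s2 := PySem.Int.bxor (PySem.Int.bor s1 q) (q >>> 1) with hs2
    have h1 : fm_py s1 q = s2 := by rw [hs2]; rfl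
    have h2 : fm_py s2 q = s1 := by
      have := fm3_eq_fm q s
      simpa [fm_py, ← hs1, ← hs2] using this
    have hstep : ktgStates (k + 1) q s = s :: ktgStates k q s1 := by
      simp [ktgStates, fm_py, hs1]
    rw [hstep]
    rcases Nat.even_or_odd k with ⟨j, hj⟩ | ⟨j, hj⟩
    · have hkj : k = 2 * j := by omega
      subst hkj
      rw [ktgStates_even q s1 s2 h1 h2 j]
      have hd : 2 * j / 2 = j := by omega
      have hm : 2 * j % 2 = 0 := by omega
      rw [hd, hm]
      simp
    · subst hj
      rw [ktgStates_odd q s1 s2 h1 h2 j]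
      have hd : (2 * j + 1) / 2 = j := by omega
      have hm : (2 * j + 1) % 2 = 1 := by omega
      rw [hd, hm]
      simp
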